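-- pv_equiv track=rewrite | github.com/belluga/delphi-ai | deterministic/core/todo_completion_guard.py | find_waiver_section
-- ===== SOURCE A (Python) =====
-- def find_waiver_section(lines: list[str]) -> list[str]:
--     in_section = False
--     content: list[str] = []
--     for line in lines:
--         stripped = line.strip()
--         if stripped.startswith("## ") or stripped.startswith("# "):
--             if "waiver" in stripped.lower():
--                 in_section = True
--                 continue
--             elif in_section:
--                 break
--         if in_section and stripped:
--             content.append(stripped)
--     return content
-- ===== SOURCE B (Python) =====
-- def find_waiver_section(lines: list[str]) -> list[str]:
--     # Pass 1: cut lines into sections (header_or_None, stripped content lines).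
--     sections = []
--     header = None
--     cur: list[str] = []
--     for line in lines:
--         s = line.strip()
--         if s.startswith("## ") or s.startswith("# "):
--             sections.append((header, cur))
--             header, cur = s, []
--         else:
--             cur.append(s)
--     sections.append((header, cur))
--     # Pass 2: gather waiver-headed sections, stop at first non-waiver section after start.
--     out: list[str] = []
--     started = False
--     for h, body in sections:
--         if h is not None and "waiver" in h.lower():
--             started = True
--             out.extend(x for x in body if x)
--         elif started:
--             break
--     return out
-- ===== Notes on version B (the rewrite author's own statement) =====
-- stated objective: alternative
-- what changed: Replaces A's single stateful scan with a two-pass decomposition: first cut the lines into (header, content) sections, then walk the sections gathering the contiguous run of waiver-headed sections starting at the first one.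
import Mathlib
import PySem

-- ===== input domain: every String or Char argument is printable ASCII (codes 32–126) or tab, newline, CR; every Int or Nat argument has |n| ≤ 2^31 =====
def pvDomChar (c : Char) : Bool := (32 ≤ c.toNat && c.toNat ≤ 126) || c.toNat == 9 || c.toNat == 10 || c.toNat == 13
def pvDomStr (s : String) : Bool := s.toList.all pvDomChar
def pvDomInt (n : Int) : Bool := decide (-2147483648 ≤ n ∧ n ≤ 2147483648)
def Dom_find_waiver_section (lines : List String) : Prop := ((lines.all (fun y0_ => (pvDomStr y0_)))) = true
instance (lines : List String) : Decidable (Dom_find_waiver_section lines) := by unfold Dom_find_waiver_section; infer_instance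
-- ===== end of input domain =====

-- Two-pass re-implementation (section split + gather) of A's single stateful scan; return value only, no mutation.

-- ===== PORT A =====
-- A's loop with `break` as structural recursion over the remaining lines,
-- carrying the `in_section` flag and the accumulated `content`.
def findWaiverGoA : List String → Bool → List String → List String
  | [], _, content => content
  | line :: rest, inSec, content =>
    let stripped := PySem.Str.strip line
    if PySem.Str.startswith stripped "## " || PySem.Str.startswith stripped "# " then
      if PySem.Str.isIn "waiver" (PySem.Str.lower stripped) then
        findWaiverGoA rest true content          -- set in_section, continue
      else if inSec then
        content                                   -- break
      else
        findWaiverGoA rest inSec content          -- fall through; append guard fails (inSec = false)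
    else if inSec && stripped ≠ "" then
      findWaiverGoA rest inSec (content ++ [stripped])
    else
      findWaiverGoA rest inSec content

def find_waiver_section (lines : List String) : List String :=
  findWaiverGoA lines false []

-- ===== PORT B =====
-- Pass 1: cut lines into sections (header_or_None, stripped content lines).
def splitSections : List String → Option String → List String → List (Option String × List String)
  | [], h, cur => [(h, cur)]
  | line :: rest, h, cur =>
    let s := PySem.Str.strip line
    if PySem.Str.startswith s "## " || PySem.Str.startswith s "# " then
      (h, cur) :: splitSections rest (some s) []
    else
      splitSections rest h (cur ++ [s])

-- Pass 2: gather waiver-headed sections; stop at first non-waiver section once started.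
def gatherWaiver : List (Option String × List String) → Bool → List String
  | [], _ => []
  | (h, body) :: rest, started =>
    match h with
    | some hs =>
      if PySem.Str.isIn "waiver" (PySem.Str.lower hs) then
        body.filter (fun x => x ≠ "") ++ gatherWaiver rest true
      else if started then [] else gatherWaiver rest started
    | none => if started then [] else gatherWaiver rest started

def find_waiver_section_alt (lines : List String) : List String :=
  gatherWaiver (splitSections lines none []) false

-- ===== PRECONDITION & SPEC =====
def Spec_find_waiver_section (lines : List String) (out : List String) : Prop := out = find_waiver_section_alt lines
instance (lines : List String) (out : List String) : Decidable (Spec_find_waiver_section lines out) := by unfold Spec_find_waiver_section; infer_instance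

-- ===== CLAIM (what is proved, stated in full; the proofs are below) =====
def Claim_equal_find_waiver_section : Prop := ∀ (lines : List String), Dom_find_waiver_section lines → Spec_find_waiver_section lines (find_waiver_section lines)

-- ===== LEMMAS AND PROOFS =====

-- shorthand predicates (proof-only)
def pvHdr (s : String) : Bool :=
  PySem.Str.startswith s "## " || PySem.Str.startswith s "# "
def pvWvr (s : String) : Bool :=
  PySem.Str.isIn "waiver" (PySem.Str.lower s)

-- one-step unfolding lemmas for the three recursive functions
theorem goA_nil (inSec : Bool) (C : List String) : findWaiverGoA [] inSec C = C := rfl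

theorem goA_cons_wvr (line : String) (rest : List String) (inSec : Bool) (C : List String)
    (hh : pvHdr (PySem.Str.strip line) = true) (hw : pvWvr (PySem.Str.strip line) = true) :
    findWaiverGoA (line :: rest) inSec C = findWaiverGoA rest true C := by
  simp only [findWaiverGoA, pvHdr, pvWvr] at *
  rw [if_pos hh, if_pos hw]

theorem goA_cons_break (line : String) (rest : List String) (C : List String)
    (hh : pvHdr (PySem.Str.strip line) = true) (hw : pvWvr (PySem.Str.strip line) = false) :
    findWaiverGoA (line :: rest) true C = C := by
  simp only [findWaiverGoA, pvHdr, pvWvr] at *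
  rw [if_pos hh, if_neg (by simpa using hw)]
  simp

theorem goA_cons_hdr_skip (line : String) (rest : List String) (C : List String)
    (hh : pvHdr (PySem.Str.strip line) = true) (hw : pvWvr (PySem.Str.strip line) = false) :
    findWaiverGoA (line :: rest) false C = findWaiverGoA rest false C := by
  simp only [findWaiverGoA, pvHdr, pvWvr] at *
  rw [if_pos hh, if_neg (by simpa using hw)]
  simp

theorem goA_cons_app (line : String) (rest : List String) (C : List String)
    (hh : pvHdr (PySem.Str.strip line) = false) (hne : PySem.Str.strip line ≠ "") :
    findWaiverGoA (line :: rest) true C = findWaiverGoA rest true (C ++ [PySem.Str.strip line]) := by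
  simp only [findWaiverGoA, pvHdr] at *
  rw [if_neg (by simpa using hh), if_pos (by simp [hne])]

theorem goA_cons_blank (line : String) (rest : List String) (C : List String)
    (hh : pvHdr (PySem.Str.strip line) = false) (hne : PySem.Str.strip line = "") :
    findWaiverGoA (line :: rest) true C = findWaiverGoA rest true C := by
  simp only [findWaiverGoA, pvHdr] at *
  rw [if_neg (by simpa using hh), if_neg (by simp [hne])]

theorem goA_cons_out (line : String) (rest : List String) (C : List String)
    (hh : pvHdr (PySem.Str.strip line) = false) :
    findWaiverGoA (line :: rest) false C = findWaiverGoA rest false C := by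
  simp only [findWaiverGoA, pvHdr] at *
  rw [if_neg (by simpa using hh)]
  simp

theorem split_nil (h : Option String) (cur : List String) :
    splitSections [] h cur = [(h, cur)] := rfl

theorem split_cons_hdr (line : String) (rest : List String) (h : Option String) (cur : List String)
    (hh : pvHdr (PySem.Str.strip line) = true) :
    splitSections (line :: rest) h cur
      = (h, cur) :: splitSections rest (some (PySem.Str.strip line)) [] := by
  simp only [splitSections, pvHdr] at *
  rw [if_pos hh]

theorem split_cons_body (line : String) (rest : List String) (h : Option String) (cur : List String)
    (hh : pvHdr (PySem.Str.strip line) = false) :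
    splitSections (line :: rest) h cur
      = splitSections rest h (cur ++ [PySem.Str.strip line]) := by
  simp only [splitSections, pvHdr] at *
  rw [if_neg (by simpa using hh)]

theorem gather_cons_wvr (hs : String) (body : List String) (r : List (Option String × List String))
    (b : Bool) (hw : pvWvr hs = true) :
    gatherWaiver ((some hs, body) :: r) b
      = body.filter (fun x => x ≠ "") ++ gatherWaiver r true := by
  simp only [gatherWaiver, pvWvr] at *
  rw [if_pos hw]

theorem gather_cons_stop (hs : String) (body : List String) (r : List (Option String × List String))
    (hw : pvWvr hs = false) :
    gatherWaiver ((some hs, body) :: r) true = [] := by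
  simp only [gatherWaiver, pvWvr] at *
  rw [if_neg (by simpa using hw)]
  simp

theorem gather_cons_skip (hs : String) (body : List String) (r : List (Option String × List String))
    (hw : pvWvr hs = false) :
    gatherWaiver ((some hs, body) :: r) false = gatherWaiver r false := by
  simp only [gatherWaiver, pvWvr] at *
  rw [if_neg (by simpa using hw)]
  simp

theorem gather_cons_none (body : List String) (r : List (Option String × List String)) :
    gatherWaiver ((none, body) :: r) false = gatherWaiver r false := by
  simp [gatherWaiver]

-- The first section produced by splitSections carries the header it was called with.
theorem splitSections_head : ∀ (rest : List String) (h : Option String) (cur : List String),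
    ∃ body tail, splitSections rest h cur = (h, body) :: tail := by
  intro rest
  induction rest with
  | nil => intro h cur; exact ⟨cur, [], rfl⟩
  | cons line rest ih =>
    intro h cur
    by_cases hh : pvHdr (PySem.Str.strip line) = true
    · exact ⟨cur, splitSections rest (some (PySem.Str.strip line)) [], split_cons_hdr _ _ _ _ hh⟩
    · obtain ⟨b, t, he⟩ := ih h (cur ++ [PySem.Str.strip line])
      exact ⟨b, t, by rw [split_cons_body _ _ _ _ (by simpa using hh), he]⟩

-- Invariant while inside a waiver section: content already holds the filtered
-- prefix `cur` of the current section's body.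
theorem goA_in_section (lines : List String) :
    ∀ (cur content : List String) (hs : String) (b : Bool),
      pvWvr hs = true →
      findWaiverGoA lines true (content ++ cur.filter (fun x => x ≠ "")) =
        content ++ gatherWaiver (splitSections lines (some hs) cur) b := by
  induction lines with
  | nil =>
    intro cur content hs b hw
    rw [goA_nil, split_nil, gather_cons_wvr _ _ _ _ hw]
    simp [gatherWaiver]
  | cons line rest ih =>
    intro cur content hs b hw
    by_cases hh : pvHdr (PySem.Str.strip line) = true
    · rw [split_cons_hdr _ _ _ _ hh, gather_cons_wvr _ _ _ _ hw]
      by_cases hw2 : pvWvr (PySem.Str.strip line) = true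
      · rw [goA_cons_wvr _ _ _ _ hh hw2]
        have h1 := ih [] (content ++ cur.filter (fun x => x ≠ "")) (PySem.Str.strip line) true hw2
        simp only [List.filter_nil, List.append_nil] at h1
        rw [h1, List.append_assoc]
      · have hw2' : pvWvr (PySem.Str.strip line) = false := by simpa using hw2
        rw [goA_cons_break _ _ _ hh hw2']
        obtain ⟨body, tail, he⟩ := splitSections_head rest (some (PySem.Str.strip line)) []
        rw [he, gather_cons_stop _ _ _ hw2']
        simp
    · have hh' : pvHdr (PySem.Str.strip line) = false := by simpa using hh
      rw [split_cons_body _ _ _ _ hh']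
      by_cases hne : PySem.Str.strip line = ""
      · rw [goA_cons_blank _ _ _ hh' hne]
        have h1 := ih (cur ++ [PySem.Str.strip line]) content hs b hw
        simpa [List.filter_append, List.filter_singleton, hne] using h1
      · rw [goA_cons_app _ _ _ hh' hne]
        have h1 := ih (cur ++ [PySem.Str.strip line]) content hs b hw
        simpa [List.filter_append, List.filter_singleton, hne] using h1

-- Before any waiver header: the current (non-waiver-headed) section is skipped entirely.
theorem goA_out_section (lines : List String) :
    ∀ (cur content : List String) (h : Option String),
      (∀ hs, h = some hs → pvWvr hs = false) →
      findWaiverGoA lines false content =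
        content ++ gatherWaiver (splitSections lines h cur) false := by
  induction lines with
  | nil =>
    intro cur content h hnw
    rw [goA_nil, split_nil]
    cases h with
    | none => rw [gather_cons_none]; simp [gatherWaiver]
    | some hs => rw [gather_cons_skip _ _ _ (hnw hs rfl)]; simp [gatherWaiver]
  | cons line rest ih =>
    intro cur content h hnw
    have hdrop : ∀ (l : List (Option String × List String)),
        gatherWaiver ((h, cur) :: l) false = gatherWaiver l false := by
      intro l
      cases h with
      | none => exact gather_cons_none _ _
      | some hs => exact gather_cons_skip _ _ _ (hnw hs rfl)
    by_cases hh : pvHdr (PySem.Str.strip line) = true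
    · rw [split_cons_hdr _ _ _ _ hh, hdrop]
      by_cases hw2 : pvWvr (PySem.Str.strip line) = true
      · rw [goA_cons_wvr _ _ _ _ hh hw2]
        have h1 := goA_in_section rest [] content (PySem.Str.strip line) false hw2
        simp only [List.filter_nil, List.append_nil] at h1
        exact h1
      · have hw2' : pvWvr (PySem.Str.strip line) = false := by simpa using hw2
        rw [goA_cons_hdr_skip _ _ _ hh hw2']
        exact ih [] content (some (PySem.Str.strip line)) (by intro x hx; cases hx; exact hw2')
    · have hh' : pvHdr (PySem.Str.strip line) = false := by simpa using hh
      rw [goA_cons_out _ _ _ hh', split_cons_body _ _ _ _ hh']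
      exact ih (cur ++ [PySem.Str.strip line]) content h hnw

-- ===== VERDICT (by name: the statement is the Claim_ definition above) =====
theorem find_waiver_section_spec : Claim_equal_find_waiver_section := by
  intro lines _
  unfold Spec_find_waiver_section find_waiver_section find_waiver_section_alt
  have := goA_out_section lines [] [] none (by intro hs h; cases h)
  simpa using this
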